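-- pv_equiv track=rewrite | github.com/KapilKumar2002/grokking-algos | pattern based problems/4. prefix sum/subarrays sum equals k.py | subarray_sum_equal_k
-- ===== SOURCE A (Python) =====
-- from typing import List
--
-- def subarray_sum_equal_k(nums: List[int], k : int):
--     n = len(nums)
--     prefix_sum = [0]*n
--     suffix_sum = [0]*n
--     prefix_sum[0] = nums[0]
--     suffix_sum[n - 1] = nums[n - 1]
--
--     ans : int = 0
--
--     for i in range (1, n):
--         prefix_sum[i] = prefix_sum[i-1] + nums[i]
--
--     for i in range (1, n):
--         suffix_sum[n-i-1] = suffix_sum[n-i] + nums[n-i-1]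
--
--     for i in range(0,n):
--         if prefix_sum[i] == k or suffix_sum[i]==k:
--             ans += 1
--
--
--     return ans
-- ===== SOURCE B (Python) =====
-- def subarray_sum_equal_k(nums, k):
--     total = sum(nums)
--     ans = 0
--     pre = 0
--     for x in nums:
--         pre += x
--         if pre == k or total - pre + x == k:
--             ans += 1
--     return ans
-- ===== Notes on version B (the rewrite author's own statement) =====
-- stated objective: simpler
-- what changed: Replaced A's two preallocated arrays and three index loops by a single pass that keeps a running prefix sum and derives the suffix sum at each position arithmetically as total - pre + x.
import Mathlib
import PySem

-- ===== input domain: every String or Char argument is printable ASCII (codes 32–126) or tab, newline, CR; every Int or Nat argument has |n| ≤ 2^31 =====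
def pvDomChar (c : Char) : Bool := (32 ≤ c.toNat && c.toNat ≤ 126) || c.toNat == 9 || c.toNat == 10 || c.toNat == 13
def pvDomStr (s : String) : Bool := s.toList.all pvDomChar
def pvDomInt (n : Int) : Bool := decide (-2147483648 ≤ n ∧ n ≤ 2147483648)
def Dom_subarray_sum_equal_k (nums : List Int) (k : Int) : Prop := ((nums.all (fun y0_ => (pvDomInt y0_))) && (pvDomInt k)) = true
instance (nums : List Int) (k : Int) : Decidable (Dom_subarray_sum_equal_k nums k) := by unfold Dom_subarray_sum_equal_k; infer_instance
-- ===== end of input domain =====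

-- B replaces A's two auxiliary arrays and three index loops by a single pass with a running
-- prefix sum, deriving each suffix sum arithmetically as total - pre + x (objective: simpler).

-- ===== PORT A =====
-- Transliteration of A: the two [0]*n arrays are replicate-lists mutated with List.set;
-- nums[i] / prefix_sum[i] reads are in range whenever Python's are, ported as getD _ 0.
def subarray_sum_equal_k (nums : List Int) (k : Int) : Int :=
  let n := nums.length
  let prefix0 := (List.replicate n (0 : Int)).set 0 (nums.getD 0 0)
  let suffix0 := (List.replicate n (0 : Int)).set (n - 1) (nums.getD (n - 1) 0)
  let prefixS := (List.range' 1 (n - 1)).foldl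
    (fun p i => p.set i (p.getD (i - 1) 0 + nums.getD i 0)) prefix0
  let suffixS := (List.range' 1 (n - 1)).foldl
    (fun s i => s.set (n - i - 1) (s.getD (n - i) 0 + nums.getD (n - i - 1) 0)) suffix0
  (List.range n).foldl
    (fun ans i => if prefixS.getD i 0 = k ∨ suffixS.getD i 0 = k then ans + 1 else ans) 0

-- ===== PORT B =====
def subarray_sum_equal_k_alt (nums : List Int) (k : Int) : Int :=
  let total := nums.sum
  (nums.foldl
    (fun (st : Int × Int) x =>
      let pre := st.2 + x
      (if pre = k ∨ total - pre + x = k then st.1 + 1 else st.1, pre))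
    ((0 : Int), (0 : Int))).1

-- ===== PRECONDITION & SPEC =====
-- Pre_ excludes only the empty list, on which Python A raises IndexError (nums[0]).
def Pre_subarray_sum_equal_k (nums : List Int) (k : Int) : Prop := nums ≠ []
instance (nums : List Int) (k : Int) : Decidable (Pre_subarray_sum_equal_k nums k) := by
  unfold Pre_subarray_sum_equal_k; infer_instance
def pvWitness_subarray_sum_equal_k : List Int × Int := ([1, 2, 3], 3)

def Spec_subarray_sum_equal_k (nums : List Int) (k : Int) (out : Int) : Prop :=
  out = subarray_sum_equal_k_alt nums k
instance (nums : List Int) (k : Int) (out : Int) : Decidable (Spec_subarray_sum_equal_k nums k out) := by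
  unfold Spec_subarray_sum_equal_k; infer_instance

-- ===== CLAIM (what is proved, stated in full; the proofs are below) =====
def Claim_equal_subarray_sum_equal_k : Prop := ∀ (nums : List Int) (k : Int),
  Dom_subarray_sum_equal_k nums k → Pre_subarray_sum_equal_k nums k →
  Spec_subarray_sum_equal_k nums k (subarray_sum_equal_k nums k)

-- ===== LEMMAS AND PROOFS =====

-- The common counting spec: walking the list with running prefix p (relative to fixed total),
-- count positions where the prefix reaches k or the remaining suffix (total - p) equals k.
def pvCnt (k total : Int) : Int → List Int → Int
  | _, [] => 0
  | p, x :: t => (if p + x = k ∨ total - p = k then 1 else 0) + pvCnt k total (p + x) t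

-- B's fold computes pvCnt.
theorem pvB_fold (k total : Int) : ∀ (l : List Int) (a p : Int),
    (l.foldl (fun (st : Int × Int) x =>
        let pre := st.2 + x
        (if pre = k ∨ total - pre + x = k then st.1 + 1 else st.1, pre)) (a, p)).1
      = a + pvCnt k total p l := by
  intro l
  induction l with
  | nil => intro a p; simp [pvCnt]
  | cons x t ih =>
    intro a p
    have hc : (p + x = k ∨ total - (p + x) + x = k) ↔ (p + x = k ∨ total - p = k) := by
      constructor
      · rintro (h | h)
        · exact Or.inl h
        · exact Or.inr (by omega)
      · rintro (h | h)
        · exact Or.inl h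
        · exact Or.inr (by omega)
    simp only [List.foldl_cons, pvCnt, ih]
    by_cases h : p + x = k ∨ total - p = k
    · rw [if_pos (hc.mpr h), if_pos h]; ring
    · rw [if_neg (fun hh => h (hc.mp hh)), if_neg h]; ring

theorem pvAlt_eq_cnt (nums : List Int) (k : Int) :
    subarray_sum_equal_k_alt nums k = pvCnt k nums.sum 0 nums := by
  unfold subarray_sum_equal_k_alt
  simpa using pvB_fold k nums.sum nums 0 0

-- The range-indexed count equals pvCnt.
theorem pvRange_cnt (k total : Int) : ∀ (l : List Int) (p c : Int),
    (List.range l.length).foldl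
      (fun a i => if p + (l.take (i + 1)).sum = k ∨ total - (p + (l.take i).sum) = k then a + 1 else a) c
      = c + pvCnt k total p l := by
  intro l
  induction l with
  | nil => intro p c; simp [pvCnt]
  | cons x t ih =>
    intro p c
    rw [List.length_cons, List.range_succ_eq_map, List.foldl_cons, List.foldl_map]
    simp only [List.take_succ_cons, List.sum_cons, List.take_zero, List.sum_nil, add_zero,
      Nat.succ_eq_add_one]
    rw [PySem.List.foldl_congr_mem _ _
        (fun (a : Int) (i : Nat) =>
          if (p + x) + (t.take (i + 1)).sum = k ∨ total - ((p + x) + (t.take i).sum) = k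
          then a + 1 else a) _
        (by
          intro a i _
          have h1 : p + (x + (t.take (i + 1)).sum) = (p + x) + (t.take (i + 1)).sum := by ring
          have h2 : p + (x + (t.take i).sum) = (p + x) + (t.take i).sum := by ring
          simp only [h1, h2])]
    rw [ih (p + x) (if p + x = k ∨ total - p = k then c + 1 else c)]
    simp [pvCnt]
    by_cases h : p + x = k ∨ total - p = k
    · simp [h]; ring
    · simp [h]

-- getD through a single set
theorem pvGetD_set (l : List Int) (i j : Nat) (v : Int) :
    (l.set i v).getD j 0 = if i = j ∧ i < l.length then v else l.getD j 0 := by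
  by_cases h1 : i = j
  · subst h1
    by_cases h2 : i < l.length
    · simp [List.getD_eq_getElem?_getD, h2]
    · simp [List.getD_eq_getElem?_getD, h2]
  · simp [List.getD_eq_getElem?_getD, List.getElem?_set, h1]

theorem pvGetD_replicate (n j : Nat) : (List.replicate n (0 : Int)).getD j 0 = 0 := by
  simp only [List.getD_eq_getElem?_getD, List.getElem?_replicate]
  split <;> simp

theorem pvTake_one (nums : List Int) (hn : nums ≠ []) :
    nums.getD 0 0 = (nums.take 1).sum := by
  cases nums with
  | nil => exact absurd rfl hn
  | cons x t => simp

theorem pvTake_step (nums : List Int) (j : Nat) (hj : j < nums.length) :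
    (nums.take j).sum + nums.getD j 0 = (nums.take (j + 1)).sum := by
  rw [List.sum_take_succ nums j hj, List.getD_eq_getElem nums 0 hj]

theorem pvDrop_step (nums : List Int) (j : Nat) (hj : j < nums.length) :
    (nums.drop j).sum = nums.getD j 0 + (nums.drop (j + 1)).sum := by
  rw [List.drop_eq_getElem_cons hj, List.sum_cons, List.getD_eq_getElem nums 0 hj]

-- prefix array invariant
theorem pvPrefix_inv (nums : List Int) (hn : nums ≠ []) : ∀ m, m ≤ nums.length - 1 →
    ((List.range' 1 m).foldl
        (fun p i => p.set i (p.getD (i - 1) 0 + nums.getD i 0))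
        ((List.replicate nums.length (0 : Int)).set 0 (nums.getD 0 0))).length = nums.length ∧
    ∀ j, j < nums.length →
      ((List.range' 1 m).foldl
        (fun p i => p.set i (p.getD (i - 1) 0 + nums.getD i 0))
        ((List.replicate nums.length (0 : Int)).set 0 (nums.getD 0 0))).getD j 0
        = if j ≤ m then (nums.take (j + 1)).sum else 0 := by
  have hn1 : 1 ≤ nums.length := List.length_pos_of_ne_nil hn
  intro m
  induction m with
  | zero =>
    intro _
    simp only [List.range'_zero, List.foldl_nil]
    refine ⟨by simp, ?_⟩
    intro j hj
    rw [pvGetD_set, pvGetD_replicate]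
    by_cases h0 : j = 0
    · subst h0
      rw [if_pos ⟨rfl, by simp only [List.length_replicate]; omega⟩, if_pos (by omega)]
      exact pvTake_one nums hn
    · rw [if_neg (fun h => h0 h.1.symm), if_neg (by omega)]
  | succ m ih =>
    intro hm
    obtain ⟨ihlen, ihval⟩ := ih (by omega)
    rw [List.range'_concat, List.foldl_append, List.foldl_cons, List.foldl_nil]
    set q := (List.range' 1 m).foldl
        (fun p i => p.set i (p.getD (i - 1) 0 + nums.getD i 0))
        ((List.replicate nums.length (0 : Int)).set 0 (nums.getD 0 0)) with hq
    rw [show 1 + 1 * m = m + 1 from by omega]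
    have hval : q.getD (m + 1 - 1) 0 + nums.getD (m + 1) 0 = (nums.take (m + 1 + 1)).sum := by
      rw [show m + 1 - 1 = m from by omega, ihval m (by omega), if_pos (le_refl m)]
      exact pvTake_step nums (m + 1) (by omega)
    refine ⟨by rw [List.length_set, ihlen], ?_⟩
    intro j hj
    rw [pvGetD_set, ihlen]
    by_cases hje : m + 1 = j
    · rw [if_pos ⟨hje, by omega⟩, hval, if_pos (by omega), hje]
    · rw [if_neg (fun h => hje h.1), ihval j hj]
      by_cases hjle : j ≤ m
      · rw [if_pos hjle, if_pos (by omega)]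
      · rw [if_neg hjle, if_neg (by omega)]

-- suffix array invariant
theorem pvSuffix_inv (nums : List Int) (hn : nums ≠ []) : ∀ m, m ≤ nums.length - 1 →
    ((List.range' 1 m).foldl
        (fun s i => s.set (nums.length - i - 1) (s.getD (nums.length - i) 0 + nums.getD (nums.length - i - 1) 0))
        ((List.replicate nums.length (0 : Int)).set (nums.length - 1) (nums.getD (nums.length - 1) 0))).length = nums.length ∧
    ∀ j, j < nums.length →
      ((List.range' 1 m).foldl
        (fun s i => s.set (nums.length - i - 1) (s.getD (nums.length - i) 0 + nums.getD (nums.length - i - 1) 0))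
        ((List.replicate nums.length (0 : Int)).set (nums.length - 1) (nums.getD (nums.length - 1) 0))).getD j 0
        = if nums.length - 1 - m ≤ j then (nums.drop j).sum else 0 := by
  have hn1 : 1 ≤ nums.length := List.length_pos_of_ne_nil hn
  intro m
  induction m with
  | zero =>
    intro _
    simp only [List.range'_zero, List.foldl_nil]
    refine ⟨by simp, ?_⟩
    intro j hj
    rw [pvGetD_set, pvGetD_replicate]
    by_cases h0 : nums.length - 1 = j
    · rw [if_pos ⟨h0, by simp only [List.length_replicate]; omega⟩, if_pos (by omega), ← h0]
      rw [List.drop_eq_getElem_cons (by omega : nums.length - 1 < nums.length),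
        show nums.length - 1 + 1 = nums.length from by omega, List.drop_length,
        List.sum_cons, List.sum_nil, List.getD_eq_getElem nums 0 (by omega)]
      ring
    · rw [if_neg (fun h => h0 h.1), if_neg (by omega)]
  | succ m ih =>
    intro hm
    obtain ⟨ihlen, ihval⟩ := ih (by omega)
    rw [List.range'_concat, List.foldl_append, List.foldl_cons, List.foldl_nil]
    set q := (List.range' 1 m).foldl
        (fun s i => s.set (nums.length - i - 1) (s.getD (nums.length - i) 0 + nums.getD (nums.length - i - 1) 0))
        ((List.replicate nums.length (0 : Int)).set (nums.length - 1) (nums.getD (nums.length - 1) 0)) with hq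
    rw [show 1 + 1 * m = m + 1 from by omega]
    have hval : q.getD (nums.length - (m + 1)) 0 + nums.getD (nums.length - (m + 1) - 1) 0
        = (nums.drop (nums.length - (m + 1) - 1)).sum := by
      rw [show nums.length - (m + 1) - 1 = nums.length - m - 2 from by omega,
        show nums.length - (m + 1) = nums.length - m - 1 from by omega,
        ihval (nums.length - m - 1) (by omega), if_pos (by omega),
        pvDrop_step nums (nums.length - m - 2) (by omega),
        show nums.length - m - 2 + 1 = nums.length - m - 1 from by omega]
      ring
    refine ⟨by rw [List.length_set, ihlen], ?_⟩
    intro j hj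
    rw [pvGetD_set, ihlen]
    by_cases hje : nums.length - (m + 1) - 1 = j
    · rw [if_pos ⟨hje, by omega⟩, hval, if_pos (by omega), hje]
    · rw [if_neg (fun h => hje h.1), ihval j hj]
      by_cases hjle : nums.length - 1 - m ≤ j
      · rw [if_pos hjle, if_pos (by omega)]
      · rw [if_neg hjle, if_neg (by omega)]

-- ===== VERDICT (by name: the statement is the Claim_ definition above) =====
theorem subarray_sum_equal_k_spec : Claim_equal_subarray_sum_equal_k := by
  intro nums k _ hpre
  unfold Spec_subarray_sum_equal_k
  rw [pvAlt_eq_cnt]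
  unfold subarray_sum_equal_k
  simp only []
  obtain ⟨_, hpv⟩ := pvPrefix_inv nums hpre (nums.length - 1) (le_refl _)
  obtain ⟨_, hsv⟩ := pvSuffix_inv nums hpre (nums.length - 1) (le_refl _)
  rw [PySem.List.foldl_congr_mem _ _
      (fun (a : Int) (i : Nat) =>
        if (0 : Int) + (nums.take (i + 1)).sum = k ∨ nums.sum - ((0 : Int) + (nums.take i).sum) = k
        then a + 1 else a) _
      (by
        intro a i hi
        have hilt : i < nums.length := List.mem_range.mp hi
        have hds : (nums.drop i).sum = nums.sum - (nums.take i).sum := by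
          have := List.sum_take_add_sum_drop nums i
          omega
        simp only [zero_add]
        rw [hpv i hilt, hsv i hilt, if_pos (show i ≤ nums.length - 1 from by omega),
          if_pos (show nums.length - 1 - (nums.length - 1) ≤ i from by omega), hds])]
  rw [pvRange_cnt k nums.sum nums 0 0]
  ring
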